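-- pv_equiv track=rewrite | github.com/rajfw/AOP-Planner | app.py | parse_prd_structure
-- ===== SOURCE A (Python) =====
-- def parse_prd_structure(text):
--     """Parse PRD and extract structured information."""
--     sections = {
--         'overview': '',
--         'objectives': '',
--         'scope': '',
--         'features': '',
--         'user_stories': '',
--         'requirements': '',
--         'success_metrics': '',
--         'timeline': '',
--         'risks': ''
--     }
--
--     # Simple section detection based on common headers
--     lines = text.split('\n')
--     current_section = None
--
--     for line in lines:
--         line_lower = line.strip().lower()
--
--         # Detect section headers
--         if any(keyword in line_lower for keyword in ['overview', 'introduction', 'background']):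
--             current_section = 'overview'
--         elif any(keyword in line_lower for keyword in ['objectives', 'goals', 'purpose']):
--             current_section = 'objectives'
--         elif any(keyword in line_lower for keyword in ['scope', 'in scope', 'out of scope']):
--             current_section = 'scope'
--         elif any(keyword in line_lower for keyword in ['features', 'functionality']):
--             current_section = 'features'
--         elif any(keyword in line_lower for keyword in ['user stories', 'user personas', 'user journey']):
--             current_section = 'user_stories'
--         elif any(keyword in line_lower for keyword in ['requirements', 'functional requirements', 'non-functional']):
--             current_section = 'requirements'
--         elif any(keyword in line_lower for keyword in ['success metrics', 'kpis', 'metrics']):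
--             current_section = 'success_metrics'
--         elif any(keyword in line_lower for keyword in ['timeline', 'milestones', 'schedule']):
--             current_section = 'timeline'
--         elif any(keyword in line_lower for keyword in ['risks', 'assumptions', 'constraints']):
--             current_section = 'risks'
--         elif line.strip() and current_section:
--             # Add content to current section
--             sections[current_section] += line + '\n'
--
--     return sections
-- ===== SOURCE B (Python) =====
-- _TABLE = [
--     ('overview', ['overview', 'introduction', 'background']),
--     ('objectives', ['objectives', 'goals', 'purpose']),
--     ('scope', ['scope', 'in scope', 'out of scope']),
--     ('features', ['features', 'functionality']),
--     ('user_stories', ['user stories', 'user personas', 'user journey']),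
--     ('requirements', ['requirements', 'functional requirements', 'non-functional']),
--     ('success_metrics', ['success metrics', 'kpis', 'metrics']),
--     ('timeline', ['timeline', 'milestones', 'schedule']),
--     ('risks', ['risks', 'assumptions', 'constraints']),
-- ]
--
--
-- def _label(line):
--     """Section name if the line is a header, else None (first matching group wins)."""
--     low = line.strip().lower()
--     for name, kws in _TABLE:
--         if any(k in low for k in kws):
--             return name
--     return None
--
--
-- def parse_prd_structure(text):
--     """Parse PRD and extract structured information (segment parser on a line stack)."""
--     sections = {name: '' for name, _ in _TABLE}
--     stack = text.split('\n')[::-1]          # top of stack = next line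
--     # discard the preamble before the first header
--     while stack and _label(stack[-1]) is None:
--         stack.pop()
--     # repeatedly pop a header, then consume its whole body up to the next header
--     while stack:
--         name = _label(stack.pop())
--         body = []
--         while stack and _label(stack[-1]) is None:
--             line = stack.pop()
--             if line.strip():
--                 body.append(line + '\n')
--         sections[name] += ''.join(body)
--     return sections
-- ===== Notes on version B (the rewrite author's own statement) =====
-- stated objective: alternative
-- what changed: Replaces A's line-by-line state machine (current-section variable updated per line, string += per content line) with a two-phase segment parser: discard the preamble, then repeatedly pop a header off a stack of lines and consume its entire body up to the next header in an inner loop, joining each segment once.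
import Mathlib
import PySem

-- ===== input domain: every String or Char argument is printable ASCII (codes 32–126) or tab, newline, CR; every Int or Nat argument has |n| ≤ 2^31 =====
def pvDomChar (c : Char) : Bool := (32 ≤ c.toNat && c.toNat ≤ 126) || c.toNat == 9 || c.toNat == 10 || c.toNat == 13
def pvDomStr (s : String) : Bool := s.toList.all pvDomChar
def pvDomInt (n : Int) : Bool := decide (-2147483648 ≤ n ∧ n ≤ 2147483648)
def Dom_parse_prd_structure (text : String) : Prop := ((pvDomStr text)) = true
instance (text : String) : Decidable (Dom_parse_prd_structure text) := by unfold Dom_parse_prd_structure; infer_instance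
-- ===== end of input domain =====

-- B replaces A's line-by-line state machine (current-section variable, one append per line) by a
-- two-phase segment parser: skip the preamble, then repeatedly pop a header off a stack of lines
-- and consume its whole body up to the next header in an inner loop, joined per segment (alternative).

-- ===== PORT A =====
-- any(keyword in line_lower for keyword in kws)
def pvAnyKw (kws : List String) (low : String) : Bool := kws.any (fun k => PySem.Str.isIn k low)

-- the body of A's for-loop; state = (sections, current_section); line_lower is inlined
def pvStepA (st : PySem.Dict String String × Option String) (line : String) :
    PySem.Dict String String × Option String :=
  if pvAnyKw ["overview", "introduction", "background"] (PySem.Str.lower (PySem.Str.strip line)) then (st.1, some "overview")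
    else if pvAnyKw ["objectives", "goals", "purpose"] (PySem.Str.lower (PySem.Str.strip line)) then (st.1, some "objectives")
    else if pvAnyKw ["scope", "in scope", "out of scope"] (PySem.Str.lower (PySem.Str.strip line)) then (st.1, some "scope")
    else if pvAnyKw ["features", "functionality"] (PySem.Str.lower (PySem.Str.strip line)) then (st.1, some "features")
    else if pvAnyKw ["user stories", "user personas", "user journey"] (PySem.Str.lower (PySem.Str.strip line)) then (st.1, some "user_stories")
    else if pvAnyKw ["requirements", "functional requirements", "non-functional"] (PySem.Str.lower (PySem.Str.strip line)) then (st.1, some "requirements")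
    else if pvAnyKw ["success metrics", "kpis", "metrics"] (PySem.Str.lower (PySem.Str.strip line)) then (st.1, some "success_metrics")
    else if pvAnyKw ["timeline", "milestones", "schedule"] (PySem.Str.lower (PySem.Str.strip line)) then (st.1, some "timeline")
    else if pvAnyKw ["risks", "assumptions", "constraints"] (PySem.Str.lower (PySem.Str.strip line)) then (st.1, some "risks")
  else if PySem.Str.strip line ≠ "" then
    match st.2 with
    | some c => (st.1.modify c "" (fun v => v ++ (line ++ "\n")), st.2)
    | none => st
  else st

def parse_prd_structure (text : String) : List (String × String) :=
  let sections : PySem.Dict String String :=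
    (((((((((PySem.Dict.empty.insert "overview" "").insert "objectives" "").insert
      "scope" "").insert "features" "").insert "user_stories" "").insert
      "requirements" "").insert "success_metrics" "").insert "timeline" "").insert "risks" "")
  -- text.split('\n'); split? is none only for an empty separator, never here
  let lines := (PySem.Str.split? text "\n").getD []
  (lines.foldl pvStepA (sections, none)).1.items

-- ===== PORT B =====
-- _TABLE
def pvTable : List (String × List String) :=
  [("overview", ["overview", "introduction", "background"]),
   ("objectives", ["objectives", "goals", "purpose"]),
   ("scope", ["scope", "in scope", "out of scope"]),
   ("features", ["features", "functionality"]),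
   ("user_stories", ["user stories", "user personas", "user journey"]),
   ("requirements", ["requirements", "functional requirements", "non-functional"]),
   ("success_metrics", ["success metrics", "kpis", "metrics"]),
   ("timeline", ["timeline", "milestones", "schedule"]),
   ("risks", ["risks", "assumptions", "constraints"])]

-- _label's for-loop over the table with early return = findSome?
def pvHit (low : String) : Option String :=
  pvTable.findSome? (fun p => if p.2.any (fun k => PySem.Str.isIn k low) then some p.1 else none)

-- _label(line)
def pvLabel (line : String) : Option String :=
  pvHit (PySem.Str.lower (PySem.Str.strip line))

-- the inner while loop: pop body lines (appending line+'\n' for the non-blank ones)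
-- until the stack is empty or a header is on top; returns (body, remaining stack)
def pvBody : List String → List String × List String
  | [] => ([], [])
  | l :: t =>
    if (pvLabel l).isSome then ([], l :: t)
    else if PySem.Str.strip l ≠ "" then
      ((l ++ "\n") :: (pvBody t).1, (pvBody t).2)
    else pvBody t

theorem pvBody_len : ∀ ls : List String, (pvBody ls).2.length ≤ ls.length := by
  intro ls
  induction ls with
  | nil => simp [pvBody]
  | cons l t ih =>
    simp only [pvBody]
    split_ifs <;> simp <;> omega

-- the outer while loop: pop a header, consume its body, add it to that section
def pvOuterLoop : List String → PySem.Dict String String → PySem.Dict String String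
  | [], d => d
  | h :: t, d =>
    -- sections[name] += ''.join(body); the loop only reaches a header line, so
    -- _label(...) is never None and the getD default is never used
    pvOuterLoop (pvBody t).2
      (d.modify ((pvLabel h).getD "") "" (fun v => v ++ PySem.Str.join "" (pvBody t).1))
termination_by ls _ => ls.length
decreasing_by simpa using Nat.lt_succ_of_le (pvBody_len t)

-- the preamble-discarding while loop
def pvSkipPre : List String → List String
  | [] => []
  | l :: t => if (pvLabel l).isSome then l :: t else pvSkipPre t

def parse_prd_structure_alt (text : String) : List (String × String) :=
  let sections : PySem.Dict String String :=
    pvTable.foldl (fun d p => d.insert p.1 "") PySem.Dict.empty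
  -- Python reverses the split lines and pops from the END, i.e. it processes the lines in
  -- original order; the stack is modelled top-first, so it is the line list itself
  let stack := (PySem.Str.split? text "\n").getD []
  (pvOuterLoop (pvSkipPre stack) sections).items

-- ===== PRECONDITION & SPEC =====
def Spec_parse_prd_structure (text : String) (out : List (String × String)) : Prop := out = parse_prd_structure_alt text
instance (text : String) (out : List (String × String)) : Decidable (Spec_parse_prd_structure text out) := by unfold Spec_parse_prd_structure; infer_instance

-- ===== CLAIM (what is proved, stated in full; the proofs are below) =====
def Claim_equal_parse_prd_structure : Prop := ∀ (text : String), Dom_parse_prd_structure text → Spec_parse_prd_structure text (parse_prd_structure text)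

-- ===== LEMMAS AND PROOFS =====
def pvNames : List String :=
  ["overview", "objectives", "scope", "features", "user_stories",
   "requirements", "success_metrics", "timeline", "risks"]

-- the key/value view under which A's fold state and B's loop state are compared
def pvEqD (d1 d2 : PySem.Dict String String) : Prop :=
  d1.keys = d2.keys ∧ ∀ k, d1.getD k "" = d2.getD k ""

theorem pvEqD_trans {d1 d2 d3 : PySem.Dict String String} (h1 : pvEqD d1 d2) (h2 : pvEqD d2 d3) :
    pvEqD d1 d3 :=
  ⟨h1.1.trans h2.1, fun k => (h1.2 k).trans (h2.2 k)⟩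

-- the first-match table scan equals the if/elif chain
theorem pvHit_eq (low : String) :
    pvHit low =
      (      if ((["overview", "introduction", "background"] : List String).any (fun k => PySem.Str.isIn k low)) then some "overview"
      else       if ((["objectives", "goals", "purpose"] : List String).any (fun k => PySem.Str.isIn k low)) then some "objectives"
      else       if ((["scope", "in scope", "out of scope"] : List String).any (fun k => PySem.Str.isIn k low)) then some "scope"
      else       if ((["features", "functionality"] : List String).any (fun k => PySem.Str.isIn k low)) then some "features"
      else       if ((["user stories", "user personas", "user journey"] : List String).any (fun k => PySem.Str.isIn k low)) then some "user_stories"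
      else       if ((["requirements", "functional requirements", "non-functional"] : List String).any (fun k => PySem.Str.isIn k low)) then some "requirements"
      else       if ((["success metrics", "kpis", "metrics"] : List String).any (fun k => PySem.Str.isIn k low)) then some "success_metrics"
      else       if ((["timeline", "milestones", "schedule"] : List String).any (fun k => PySem.Str.isIn k low)) then some "timeline"
      else       if ((["risks", "assumptions", "constraints"] : List String).any (fun k => PySem.Str.isIn k low)) then some "risks"
      else none) := by
  unfold pvHit pvTable
  rw [List.findSome?_cons]
  dsimp only
  by_cases h1 : ((["overview", "introduction", "background"] : List String).any (fun k => PySem.Str.isIn k low)) = true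
  · rw [if_pos h1, if_pos h1]
  rw [if_neg h1, if_neg h1]
  rw [List.findSome?_cons]
  dsimp only
  by_cases h2 : ((["objectives", "goals", "purpose"] : List String).any (fun k => PySem.Str.isIn k low)) = true
  · rw [if_pos h2, if_pos h2]
  rw [if_neg h2, if_neg h2]
  rw [List.findSome?_cons]
  dsimp only
  by_cases h3 : ((["scope", "in scope", "out of scope"] : List String).any (fun k => PySem.Str.isIn k low)) = true
  · rw [if_pos h3, if_pos h3]
  rw [if_neg h3, if_neg h3]
  rw [List.findSome?_cons]
  dsimp only
  by_cases h4 : ((["features", "functionality"] : List String).any (fun k => PySem.Str.isIn k low)) = true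
  · rw [if_pos h4, if_pos h4]
  rw [if_neg h4, if_neg h4]
  rw [List.findSome?_cons]
  dsimp only
  by_cases h5 : ((["user stories", "user personas", "user journey"] : List String).any (fun k => PySem.Str.isIn k low)) = true
  · rw [if_pos h5, if_pos h5]
  rw [if_neg h5, if_neg h5]
  rw [List.findSome?_cons]
  dsimp only
  by_cases h6 : ((["requirements", "functional requirements", "non-functional"] : List String).any (fun k => PySem.Str.isIn k low)) = true
  · rw [if_pos h6, if_pos h6]
  rw [if_neg h6, if_neg h6]
  rw [List.findSome?_cons]
  dsimp only
  by_cases h7 : ((["success metrics", "kpis", "metrics"] : List String).any (fun k => PySem.Str.isIn k low)) = true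
  · rw [if_pos h7, if_pos h7]
  rw [if_neg h7, if_neg h7]
  rw [List.findSome?_cons]
  dsimp only
  by_cases h8 : ((["timeline", "milestones", "schedule"] : List String).any (fun k => PySem.Str.isIn k low)) = true
  · rw [if_pos h8, if_pos h8]
  rw [if_neg h8, if_neg h8]
  rw [List.findSome?_cons]
  dsimp only
  by_cases h9 : ((["risks", "assumptions", "constraints"] : List String).any (fun k => PySem.Str.isIn k low)) = true
  · rw [if_pos h9]
  rw [if_neg h9]
  rfl

-- A's loop body, re-expressed through B's header classifier
set_option maxHeartbeats 2000000 in
theorem pvStepA_eq (st : PySem.Dict String String × Option String) (line : String) :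
    pvStepA st line =
      match pvHit (PySem.Str.lower (PySem.Str.strip line)) with
      | some s => (st.1, some s)
      | none =>
        if PySem.Str.strip line ≠ "" then
          match st.2 with
          | some c => (st.1.modify c "" (fun v => v ++ (line ++ "\n")), st.2)
          | none => st
        else st := by
  unfold pvStepA pvAnyKw
  rw [pvHit_eq]
  split_ifs <;> rfl

theorem pvHit_mem {low s : String} (h : pvHit low = some s) : s ∈ pvNames := by
  rw [pvHit_eq] at h
  split_ifs at h <;> (injection h with hh; subst hh; decide)

theorem pvJoin_cons (x : String) (v : List String) :
    PySem.Str.join "" (x :: v) = x ++ PySem.Str.join "" v := by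
  apply String.toList_inj.mp
  simp only [String.toList_append, PySem.Str.toList_join, List.map]
  rw [show ("".toList : List Char) = [] from rfl]
  cases v with
  | nil => simp [PySem.Chars.join_singleton, PySem.Chars.join_nil]
  | cons b r =>
    simp only [List.map_cons]
    rw [PySem.Chars.join_cons_cons]
    simp

theorem pvModify_cong (d1 d2 : PySem.Dict String String) (c : String) (f : String → String)
    (h : pvEqD d1 d2) : pvEqD (d1.modify c "" f) (d2.modify c "" f) := by
  obtain ⟨hk, hg⟩ := h
  have hcc : d1.contains c = d2.contains c := by
    rw [PySem.Dict.contains_eq_decide_mem_keys, PySem.Dict.contains_eq_decide_mem_keys, hk]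
  constructor
  · by_cases hc : d1.contains c = true
    · rw [PySem.Dict.keys_modify, PySem.Dict.keys_insert_of_contains _ _ hc,
          PySem.Dict.keys_modify, PySem.Dict.keys_insert_of_contains _ _ (hcc ▸ hc), hk]
    · have hc1 : d1.contains c = false := by revert hc; cases d1.contains c <;> simp
      have hc2 : d2.contains c = false := hcc ▸ hc1
      rw [PySem.Dict.keys_modify, PySem.Dict.keys_insert_of_not_contains _ _ hc1,
          PySem.Dict.keys_modify, PySem.Dict.keys_insert_of_not_contains _ _ hc2, hk]
  · intro k
    rw [PySem.Dict.getD_modify, PySem.Dict.getD_modify]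
    by_cases hkc : k = c
    · rw [if_pos hkc, if_pos hkc, hg]
    · rw [if_neg hkc, if_neg hkc]; exact hg k

-- appending ''.join([]) to a present key changes nothing
theorem pvModify_nil (d : PySem.Dict String String) (c : String) (hc : c ∈ d.keys) :
    pvEqD d (d.modify c "" (fun v => v ++ PySem.Str.join "" ([] : List String))) := by
  constructor
  · rw [PySem.Dict.keys_modify, PySem.Dict.keys_insert_of_contains _ _
      (by rw [PySem.Dict.contains_eq_decide_mem_keys]; exact decide_eq_true hc)]
  · intro k
    rw [PySem.Dict.getD_modify]
    by_cases hkc : k = c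
    · rw [if_pos hkc]; subst hkc; simp [PySem.Str.join]
    · rw [if_neg hkc]

-- two successive appends at the same key = one append of the concatenation
theorem pvModify_modify (d : PySem.Dict String String) (c x y : String) :
    pvEqD ((d.modify c "" (fun v => v ++ x)).modify c "" (fun v => v ++ y))
          (d.modify c "" (fun v => v ++ (x ++ y))) := by
  have hmem : c ∈ (d.modify c "" (fun v => v ++ x)).keys := by
    rw [PySem.Dict.keys_modify]; exact (PySem.Dict.mem_keys_insert _ _ _ _).mpr (Or.inl rfl)
  have hmc : (d.modify c "" (fun v => v ++ x)).contains c = true := by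
    rw [PySem.Dict.contains_eq_decide_mem_keys]; exact decide_eq_true hmem
  constructor
  · by_cases hc : d.contains c = true
    · rw [PySem.Dict.keys_modify, PySem.Dict.keys_insert_of_contains _ _ hmc,
          PySem.Dict.keys_modify, PySem.Dict.keys_insert_of_contains _ _ hc,
          PySem.Dict.keys_modify, PySem.Dict.keys_insert_of_contains _ _ hc]
    · have hc1 : d.contains c = false := by revert hc; cases d.contains c <;> simp
      rw [PySem.Dict.keys_modify, PySem.Dict.keys_insert_of_contains _ _ hmc,
          PySem.Dict.keys_modify, PySem.Dict.keys_insert_of_not_contains _ _ hc1,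
          PySem.Dict.keys_modify, PySem.Dict.keys_insert_of_not_contains _ _ hc1]
  · intro k
    simp only [PySem.Dict.getD_modify]
    by_cases hkc : k = c
    · subst hkc
      apply String.toList_inj.mp
      simp [List.append_assoc]
    · simp [hkc]

theorem pvOuterLoop_nil (d : PySem.Dict String String) : pvOuterLoop [] d = d := by
  rw [pvOuterLoop]

theorem pvOuterLoop_cons (h : String) (t : List String) (d : PySem.Dict String String) :
    pvOuterLoop (h :: t) d =
      pvOuterLoop (pvBody t).2
        (d.modify ((pvLabel h).getD "") "" (fun v => v ++ PySem.Str.join "" (pvBody t).1)) := by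
  rw [pvOuterLoop]

-- B's outer loop respects the key/value view
theorem pvOuterLoop_cong : ∀ (n : Nat) (ls : List String) (d1 d2 : PySem.Dict String String),
    ls.length ≤ n → pvEqD d1 d2 → pvEqD (pvOuterLoop ls d1) (pvOuterLoop ls d2) := by
  intro n
  induction n with
  | zero =>
    intro ls d1 d2 hlen h
    have : ls = [] := List.eq_nil_of_length_eq_zero (Nat.le_zero.mp hlen)
    subst this
    rw [pvOuterLoop_nil, pvOuterLoop_nil]; exact h
  | succ n ih =>
    intro ls d1 d2 hlen h
    cases ls with
    | nil => rw [pvOuterLoop_nil, pvOuterLoop_nil]; exact h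
    | cons l t =>
      rw [pvOuterLoop_cons, pvOuterLoop_cons]
      exact ih _ _ _ (le_trans (pvBody_len t) (Nat.le_of_succ_le_succ hlen))
        (pvModify_cong _ _ _ _ h)

-- A's fold keeps the key set pvNames
theorem pvKeysA : ∀ (ls : List String) (d : PySem.Dict String String) (oc : Option String),
    d.keys = pvNames → (∀ c, oc = some c → c ∈ pvNames) →
    (List.foldl pvStepA (d, oc) ls).1.keys = pvNames := by
  intro ls
  induction ls with
  | nil => intro d oc hk _; exact hk
  | cons l t ih =>
    intro d oc hk hoc
    rw [List.foldl_cons, pvStepA_eq]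
    cases hl : pvHit (PySem.Str.lower (PySem.Str.strip l)) with
    | some s =>
      exact ih d (some s) hk (fun c hcc => by injection hcc with hh; subst hh; exact pvHit_mem hl)
    | none =>
      dsimp only
      by_cases hs : PySem.Str.strip l ≠ ""
      · rw [if_pos hs]
        cases oc with
        | none => exact ih d none hk hoc
        | some c =>
          have hcn : c ∈ pvNames := hoc c rfl
          refine ih _ (some c) ?_ hoc
          rw [PySem.Dict.keys_modify, PySem.Dict.keys_insert_of_contains _ _
            (by rw [PySem.Dict.contains_eq_decide_mem_keys, hk]; exact decide_eq_true hcn)]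
          exact hk
      · rw [if_neg hs]; exact ih d oc hk hoc

-- MAIN: after a header establishing section c, A's remaining fold equals B's
-- body-consuming step followed by the outer loop on the rest
theorem pvMainAux : ∀ (n : Nat) (ls : List String) (d : PySem.Dict String String) (c : String),
    ls.length ≤ n → d.keys = pvNames → c ∈ pvNames →
    pvEqD (List.foldl pvStepA (d, some c) ls).1
      (pvOuterLoop (pvBody ls).2
        (d.modify c "" (fun v => v ++ PySem.Str.join "" (pvBody ls).1))) := by
  intro n
  induction n with
  | zero =>
    intro ls d c hlen hk hc
    have : ls = [] := List.eq_nil_of_length_eq_zero (Nat.le_zero.mp hlen)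
    subst this
    rw [show pvBody [] = (([] : List String), ([] : List String)) from rfl]
    rw [List.foldl_nil, pvOuterLoop_nil]
    exact pvModify_nil d c (hk ▸ hc)
  | succ n ih =>
    intro ls d c hlen hk hc
    cases ls with
    | nil =>
      rw [show pvBody [] = (([] : List String), ([] : List String)) from rfl]
      rw [List.foldl_nil, pvOuterLoop_nil]
      exact pvModify_nil d c (hk ▸ hc)
    | cons l t =>
      rw [List.foldl_cons, pvStepA_eq]
      have hlt : t.length ≤ n := Nat.le_of_succ_le_succ hlen
      cases hl : pvHit (PySem.Str.lower (PySem.Str.strip l)) with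
      | some s =>
        have hb : pvBody (l :: t) = ([], l :: t) := by
          simp [pvBody, pvLabel, hl]
        rw [hb]
        dsimp only
        rw [pvOuterLoop_cons]
        rw [show (pvLabel l).getD "" = s from by simp [pvLabel, hl]]
        refine pvEqD_trans (ih t d s hlt hk (pvHit_mem hl)) ?_
        exact pvOuterLoop_cong (pvBody t).2.length _ _ _ (le_refl _)
          (pvModify_cong _ _ s _ (pvModify_nil d c (hk ▸ hc)))
      | none =>
        dsimp only
        by_cases hs : PySem.Str.strip l ≠ ""
        · rw [if_pos hs]
          have hb : pvBody (l :: t) = ((l ++ "\n") :: (pvBody t).1, (pvBody t).2) := by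
            simp only [pvBody, pvLabel, hl, if_pos hs, Option.isSome_none, Bool.false_eq_true,
              if_false]
          rw [hb]
          have hk' : (d.modify c "" (fun v => v ++ (l ++ "\n"))).keys = pvNames := by
            rw [PySem.Dict.keys_modify, PySem.Dict.keys_insert_of_contains _ _
              (by rw [PySem.Dict.contains_eq_decide_mem_keys, hk]; exact decide_eq_true hc)]
            exact hk
          refine pvEqD_trans (ih t _ c hlt hk' hc) ?_
          refine pvOuterLoop_cong (pvBody t).2.length _ _ _ (le_refl _) ?_
          rw [pvJoin_cons]
          exact pvModify_modify d c (l ++ "\n") (PySem.Str.join "" (pvBody t).1)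
        · rw [if_neg hs]
          have hb : pvBody (l :: t) = pvBody t := by
            simp only [pvBody, pvLabel, hl]
            simp at hs
            simp [hs]
          rw [hb]
          exact ih t d c hlt hk hc

-- before the first header, A's loop leaves its state untouched
theorem pvSkipA : ∀ (ls : List String) (d : PySem.Dict String String),
    List.foldl pvStepA (d, none) ls = List.foldl pvStepA (d, none) (pvSkipPre ls) := by
  intro ls
  induction ls with
  | nil => intro d; rfl
  | cons l t ih =>
    intro d
    simp only [pvSkipPre]
    by_cases hl : (pvLabel l).isSome = true
    · rw [if_pos hl]
    · rw [if_neg hl]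
      have hnone : pvHit (PySem.Str.lower (PySem.Str.strip l)) = none := by
        revert hl; unfold pvLabel; cases pvHit (PySem.Str.lower (PySem.Str.strip l)) <;> simp
      rw [List.foldl_cons, pvStepA_eq, hnone]
      dsimp only
      rw [show (if PySem.Str.strip l ≠ "" then
            ((d, (none : Option String)).1, (d, (none : Option String)).2)
          else (d, none)) = (d, none) from by split <;> rfl]
      exact ih d

theorem pvSkipPre_spec : ∀ ls : List String,
    pvSkipPre ls = [] ∨ ∃ h t, pvSkipPre ls = h :: t ∧ (pvLabel h).isSome = true := by
  intro ls
  induction ls with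
  | nil => exact Or.inl rfl
  | cons l t ih =>
    simp only [pvSkipPre]
    by_cases hl : (pvLabel l).isSome = true
    · exact Or.inr ⟨l, t, by rw [if_pos hl], hl⟩
    · rw [if_neg hl]; exact ih

def pvInit : PySem.Dict String String :=
  (((((((((PySem.Dict.empty.insert "overview" "").insert "objectives" "").insert
    "scope" "").insert "features" "").insert "user_stories" "").insert
    "requirements" "").insert "success_metrics" "").insert "timeline" "").insert "risks" "")

theorem pvInit_eq : pvTable.foldl (fun d p => d.insert p.1 "") PySem.Dict.empty = pvInit := by
  decide

theorem pvInit_keys : pvInit.keys = pvNames := by decide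

-- equal key/value views with key list pvNames give equal items lists
theorem pvItems_of_pvEqD (d1 d2 : PySem.Dict String String) (h : pvEqD d1 d2)
    (hk : d1.keys = pvNames) : d1.items = d2.items := by
  have hnd : pvNames.Nodup := by decide
  rw [PySem.Dict.items_eq_map_keys d1 (hk ▸ hnd) "",
      PySem.Dict.items_eq_map_keys d2 ((h.1 ▸ hk) ▸ hnd) "", ← h.1, hk]
  exact List.map_congr_left (fun k _ => congrArg (fun v => (k, v)) (h.2 k))

-- ===== VERDICT (by name: the statement is the Claim_ definition above) =====
theorem parse_prd_structure_spec : Claim_equal_parse_prd_structure := by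
  intro text _
  show parse_prd_structure text = parse_prd_structure_alt text
  unfold parse_prd_structure parse_prd_structure_alt
  rw [pvInit_eq]
  set lines := (PySem.Str.split? text "\n").getD [] with hlines
  show (List.foldl pvStepA (pvInit, none) lines).1.items = (pvOuterLoop (pvSkipPre lines) pvInit).items
  rw [pvSkipA lines pvInit]
  rcases pvSkipPre_spec lines with h0 | ⟨h, t, heq, hsome⟩
  · rw [h0, List.foldl_nil, pvOuterLoop_nil]
  · obtain ⟨s, hl⟩ := Option.isSome_iff_exists.mp hsome
    have hl' : pvHit (PySem.Str.lower (PySem.Str.strip h)) = some s := hl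
    rw [heq, List.foldl_cons, pvStepA_eq, hl']
    dsimp only
    rw [pvOuterLoop_cons]
    rw [show (pvLabel h).getD "" = s from by rw [hl]; rfl]
    refine pvItems_of_pvEqD _ _ ?_ (pvKeysA t pvInit (some s) pvInit_keys
      (fun c hcc => by injection hcc with hh; subst hh; exact pvHit_mem hl'))
    exact pvMainAux t.length t pvInit s (le_refl _) pvInit_keys (pvHit_mem hl')
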